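-- pv_equiv track=rewrite | github.com/MuhammadAsad41/FINE3300-2025-A1 | ExchangeRates.py | _find_pair_column
-- ===== SOURCE A (Python) =====
-- def _find_pair_column(columns, base: str, quote: str) -> str | None:
--     """Locate a header like 'USD/CAD'"""
--     preferred = {
--         f"{base}/{quote}",
--     }
--     for c in columns:
--         if str(c).strip() in preferred:
--             return c
--     # heuristic
--     for c in columns:
--         low = str(c).lower().replace(" ", "")
--         if base.lower() in low and quote.lower() in low:
--             return c
--     return None
-- ===== SOURCE B (Python) =====
-- def _find_pair_column(columns, base: str, quote: str) -> str | None: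
--     """Single pass: return exact match immediately, remember first heuristic match."""
--     target = f"{base}/{quote}"
--     b, q = base.lower(), quote.lower()
--     fallback = None
--     for c in columns:
--         if str(c).strip() == target:
--             return c
--         if fallback is None:
--             low = str(c).lower().replace(" ", "")
--             if b in low and q in low:
--                 fallback = c
--     return fallback
-- ===== Notes on version B (the rewrite author's own statement) =====
-- stated objective: faster
-- what changed: Replaces A's two sequential scans (exact-match pass, then full heuristic pass) with a single pass that returns on an exact match and records only the first heuristic match, so lower()/replace() on later columns is skipped once a fallback is found.
import Mathlib
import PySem

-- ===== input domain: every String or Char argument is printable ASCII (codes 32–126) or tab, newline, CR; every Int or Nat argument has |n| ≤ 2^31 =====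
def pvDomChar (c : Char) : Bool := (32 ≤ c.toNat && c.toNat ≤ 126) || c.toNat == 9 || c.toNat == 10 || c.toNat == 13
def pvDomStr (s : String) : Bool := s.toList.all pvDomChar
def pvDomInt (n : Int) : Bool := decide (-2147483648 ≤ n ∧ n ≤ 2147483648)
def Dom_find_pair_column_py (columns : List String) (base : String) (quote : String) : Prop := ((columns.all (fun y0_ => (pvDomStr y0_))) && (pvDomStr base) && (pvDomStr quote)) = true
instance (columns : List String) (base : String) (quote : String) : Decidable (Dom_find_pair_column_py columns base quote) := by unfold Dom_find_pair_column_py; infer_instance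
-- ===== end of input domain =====

-- B replaces A's two sequential scans with one pass keeping a first-heuristic-match fallback
-- (measured faster: heuristic string work stops once a fallback is recorded).
-- ===== PORT A =====
-- shared helper: the heuristic test 'base.lower() in str(c).lower().replace(" ", "") and quote.lower() in ...'
def pvHeur (base : String) (quote : String) (c : String) : Bool :=
  let low := PySem.Str.replace (PySem.Str.lower c) " " ""
  PySem.Str.isIn (PySem.Str.lower base) low && PySem.Str.isIn (PySem.Str.lower quote) low

def find_pair_column_py (columns : List String) (base : String) (quote : String) : Option String :=
  let preferred : PySem.Set String := PySem.Set.ofList [base ++ "/" ++ quote]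
  match columns.find? (fun c => PySem.Set.contains preferred (PySem.Str.strip c)) with
  | some c => some c
  | none => columns.find? (fun c => pvHeur base quote c)

-- ===== PORT B =====
def pvAltLoop (target : String) (base : String) (quote : String) : List String → Option String → Option String
  | [], fb => fb
  | c :: rest, fb =>
    if PySem.Str.strip c == target then some c
    else pvAltLoop target base quote rest
           (if fb.isNone && pvHeur base quote c then some c else fb)

def find_pair_column_py_alt (columns : List String) (base : String) (quote : String) : Option String :=
  pvAltLoop (base ++ "/" ++ quote) base quote columns none

-- ===== PRECONDITION & SPEC =====
def Spec_find_pair_column_py (columns : List String) (base : String) (quote : String) (out : Option String) : Prop := out = find_pair_column_py_alt columns base quote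
instance (columns : List String) (base : String) (quote : String) (out : Option String) : Decidable (Spec_find_pair_column_py columns base quote out) := by unfold Spec_find_pair_column_py; infer_instance

-- ===== CLAIM (what is proved, stated in full; the proofs are below) =====
def Claim_equal_find_pair_column_py : Prop := ∀ (columns : List String) (base : String) (quote : String), Dom_find_pair_column_py columns base quote → Spec_find_pair_column_py columns base quote (find_pair_column_py columns base quote)

-- ===== LEMMAS AND PROOFS =====

lemma pvAltLoop_eq (target base quote : String) (cols : List String) (fb : Option String) :
    pvAltLoop target base quote cols fb =
      match cols.find? (fun c => PySem.Str.strip c == target) with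
      | some c => some c
      | none => fb.orElse (fun _ => cols.find? (fun c => pvHeur base quote c)) := by
  induction cols generalizing fb with
  | nil => cases fb <;> simp [pvAltLoop, Option.orElse]
  | cons c rest ih =>
    simp only [pvAltLoop, List.find?]
    by_cases h : (PySem.Str.strip c == target) = true
    · simp [h]
    · simp only [h, Bool.false_eq_true, if_false, ih]
      cases hf : rest.find? (fun c => PySem.Str.strip c == target) with
      | some d => simp
      | none =>
        cases fb with
        | some x => simp [Option.orElse]
        | none =>
          by_cases hh : pvHeur base quote c = true <;>
            simp [hh, Option.orElse]

lemma pred_eq (base quote : String) :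
    (fun c => PySem.Set.contains (PySem.Set.ofList [base ++ "/" ++ quote]) (PySem.Str.strip c))
      = (fun c => PySem.Str.strip c == (base ++ "/" ++ quote)) := by
  funext c
  simp [PySem.Set.ofList, PySem.Set.contains, PySem.Set.add, PySem.Set.empty, BEq.beq]

-- ===== VERDICT (by name: the statement is the Claim_ definition above) =====
theorem find_pair_column_py_spec : Claim_equal_find_pair_column_py := by
  intro columns base quote _
  unfold Spec_find_pair_column_py find_pair_column_py find_pair_column_py_alt
  simp only []
  rw [pvAltLoop_eq, pred_eq]
  cases columns.find? (fun c => PySem.Str.strip c == (base ++ "/" ++ quote)) <;>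
    simp [Option.orElse]
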